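-- pv_equiv track=rewrite | github.com/anaSavastre/adventOfCode2021 | day8/sevenSegmentSearch.py | sortInput
-- ===== SOURCE A (Python) =====
-- def sortInput(list):
--     sorted = [[], [], []]
--     segmentLengths = [2, 4, 3, 7]
--     for elem in list:
--         if len(elem) in segmentLengths:
--             sorted[0].append(elem)
--         elif len(elem) == 5:
--             sorted[1].append(elem)
--         elif len(elem) == 6:
--             sorted[2].append(elem)
--     return sorted
-- ===== SOURCE B (Python) =====
-- def sortInput(list):
--     return [
--         [e for e in list if len(e) in (2, 3, 4, 7)],
--         [e for e in list if len(e) == 5],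
--         [e for e in list if len(e) == 6],
--     ]
-- ===== Notes on version B (the rewrite author's own statement) =====
-- stated objective: simpler
-- what changed: Replaces the single branching loop that mutates three accumulators with three independent filtering comprehensions, one per bucket.
import Mathlib
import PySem

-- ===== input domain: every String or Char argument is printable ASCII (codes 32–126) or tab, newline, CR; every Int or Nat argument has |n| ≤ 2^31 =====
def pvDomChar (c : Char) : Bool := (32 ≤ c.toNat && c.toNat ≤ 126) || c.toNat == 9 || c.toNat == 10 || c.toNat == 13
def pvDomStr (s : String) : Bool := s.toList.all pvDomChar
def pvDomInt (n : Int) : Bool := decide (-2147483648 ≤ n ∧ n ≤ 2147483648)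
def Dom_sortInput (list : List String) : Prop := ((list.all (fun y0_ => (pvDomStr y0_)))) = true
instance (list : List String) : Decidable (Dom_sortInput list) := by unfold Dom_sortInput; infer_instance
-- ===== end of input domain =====

-- B builds the three buckets by three independent filtering passes instead of A's single branching loop; objective: simpler.

-- ===== PORT A =====
-- A's loop: one pass, appending each element to the bucket chosen by the if/elif chain.
def sortInputStep (s : List String × List String × List String) (elem : String)
    : List String × List String × List String :=
  if PySem.Str.len elem ∈ ([2, 4, 3, 7] : List Int) then (s.1 ++ [elem], s.2.1, s.2.2)
  else if PySem.Str.len elem = 5 then (s.1, s.2.1 ++ [elem], s.2.2)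
  else if PySem.Str.len elem = 6 then (s.1, s.2.1, s.2.2 ++ [elem])
  else s

def sortInput (list : List String) : List (List String) :=
  let s := list.foldl sortInputStep ([], [], [])
  [s.1, s.2.1, s.2.2]

-- ===== PORT B =====
def sortInput_alt (list : List String) : List (List String) :=
  [ list.filter (fun e => PySem.Str.len e ∈ ([2, 3, 4, 7] : List Int)),
    list.filter (fun e => PySem.Str.len e = 5),
    list.filter (fun e => PySem.Str.len e = 6) ]

-- ===== PRECONDITION & SPEC =====
def Spec_sortInput (list : List String) (out : List (List String)) : Prop := out = sortInput_alt list
instance (list : List String) (out : List (List String)) : Decidable (Spec_sortInput list out) := by unfold Spec_sortInput; infer_instance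

-- ===== CLAIM (what is proved, stated in full; the proofs are below) =====
def Claim_equal_sortInput : Prop := ∀ (list : List String), Dom_sortInput list → Spec_sortInput list (sortInput list)

-- ===== LEMMAS AND PROOFS =====
theorem sortInput_foldl (list : List String) (a b c : List String) :
    list.foldl sortInputStep (a, b, c) =
      (a ++ list.filter (fun e => PySem.Str.len e ∈ ([2, 3, 4, 7] : List Int)),
       b ++ list.filter (fun e => PySem.Str.len e = 5),
       c ++ list.filter (fun e => PySem.Str.len e = 6)) := by
  induction list generalizing a b c with
  | nil => simp
  | cons x xs ih =>
    simp only [List.foldl_cons, sortInputStep, List.mem_cons, List.not_mem_nil, or_false,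
      PySem.Str.len, String.length_toList]
    by_cases h1 : ((x.length : Int)) = 2 ∨ ((x.length : Int)) = 4 ∨ ((x.length : Int)) = 3 ∨
        ((x.length : Int)) = 7
    · have hA : ((x.length : Int)) = 2 ∨ ((x.length : Int)) = 3 ∨ ((x.length : Int)) = 4 ∨
          ((x.length : Int)) = 7 := by omega
      have hA5 : ¬ ((x.length : Int)) = 5 := by omega
      have hA6 : ¬ ((x.length : Int)) = 6 := by omega
      rw [if_pos h1, ih]
      simp [List.mem_cons, PySem.Str.len, hA, hA5, hA6]
    · have hA : ¬ (((x.length : Int)) = 2 ∨ ((x.length : Int)) = 3 ∨ ((x.length : Int)) = 4 ∨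
          ((x.length : Int)) = 7) := by omega
      rw [if_neg h1]
      by_cases h5 : ((x.length : Int)) = 5
      · rw [if_pos h5, ih]
        simp [List.mem_cons, PySem.Str.len, h5]
      · rw [if_neg h5]
        by_cases h6 : ((x.length : Int)) = 6
        · rw [if_pos h6, ih]
          simp [List.mem_cons, PySem.Str.len, h6]
        · rw [if_neg h6, ih]
          simp [List.mem_cons, PySem.Str.len, hA, h5, h6]

-- ===== VERDICT (by name: the statement is the Claim_ definition above) =====
theorem sortInput_spec : Claim_equal_sortInput := by
  intro list _
  unfold Spec_sortInput sortInput sortInput_alt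
  simp [sortInput_foldl]
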